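-- pv_equiv track=rewrite | github.com/sarabsethi/audioset_soundscape_feats_sethi2019 | analysis_libs.py | uniqueify_list
-- ===== SOURCE A (Python) =====
-- def uniqueify_list(mylist):
--     dups = {}
--
--     for i, val in enumerate(mylist):
--         if val not in dups:
--             # Store index of first occurrence and occurrence value
--             dups[val] = [i, 1]
--         else:
--             # Special case for first occurrence
--             if dups[val][1] == 1:
--                 mylist[dups[val][0]] += ' {}'.format(str(dups[val][1]))
--
--             # Increment occurrence value, index value doesn't matter anymore
--             dups[val][1] += 1
--
--             # Use stored occurrence value
--             mylist[i] += ' {}'.format(str(dups[val][1]))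
--
--     return mylist
-- ===== SOURCE B (Python) =====
-- def uniqueify_list(mylist):
--     # Pass 1: count occurrences of each original value.
--     counts = {}
--     for val in mylist:
--         counts[val] = counts.get(val, 0) + 1
--     # Pass 2: append the running occurrence number to every duplicated value.
--     seen = {}
--     for i, val in enumerate(mylist):
--         if counts[val] > 1:
--             seen[val] = seen.get(val, 0) + 1
--             mylist[i] += ' {}'.format(seen[val])
--     return mylist
-- ===== Notes on version B (the rewrite author's own statement) =====
-- stated objective: simpler
-- what changed: Two plain passes (count all values first, then append running occurrence numbers) replace A's single pass with a dict of [first-index, count] records and lazy back-patching of the first occurrence.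
import Mathlib
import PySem

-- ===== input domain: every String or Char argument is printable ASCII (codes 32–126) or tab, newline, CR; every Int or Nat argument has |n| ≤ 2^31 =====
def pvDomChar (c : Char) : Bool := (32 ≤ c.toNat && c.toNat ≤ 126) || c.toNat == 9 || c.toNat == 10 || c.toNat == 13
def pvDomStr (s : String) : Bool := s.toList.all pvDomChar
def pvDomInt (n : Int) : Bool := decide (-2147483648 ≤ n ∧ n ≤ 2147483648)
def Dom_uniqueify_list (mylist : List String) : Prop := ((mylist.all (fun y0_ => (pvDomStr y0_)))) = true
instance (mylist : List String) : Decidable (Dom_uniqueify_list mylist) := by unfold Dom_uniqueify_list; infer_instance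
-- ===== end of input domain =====

-- B replaces A's single pass over a dict of [first-index, count] records with lazy back-patching of
-- first occurrences by two plain passes: count every value, then append running occurrence numbers
-- (objective: simpler). Both Pythons mutate `mylist` in place and return it; the equivalence proved
-- here is about the returned value.

-- ===== PORT A =====
-- one loop step of A: state = (the list being mutated, dups : val ↦ (first index, occurrence count))
def stepA (st : List String × PySem.Dict String (Int × Int)) (iv : Int × String) :
    List String × PySem.Dict String (Int × Int) :=
  let lst := st.1
  let dups := st.2
  let i := iv.1
  let val := iv.2
  if dups.contains val = false then (lst, dups.insert val (i, 1))
  else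
    let fc := dups.getD val (0, 0)
    let lst1 := if fc.2 = 1 then
        PySem.List.pySetD lst fc.1 (PySem.List.pyGetD lst fc.1 "" ++ " " ++ PySem.Int.toStr fc.2)
      else lst
    let dups1 := dups.insert val (fc.1, fc.2 + 1)
    (PySem.List.pySetD lst1 i (PySem.List.pyGetD lst1 i "" ++ " " ++ PySem.Int.toStr (fc.2 + 1)), dups1)

def uniqueify_list (mylist : List String) : List String :=
  ((PySem.List.enumerate mylist 0).foldl stepA (mylist, PySem.Dict.empty)).1

-- ===== PORT B =====
-- one step of B's second pass: state = (the list being mutated, seen : val ↦ running occurrence number)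
def stepB (counts : PySem.Dict String Int) (st : List String × PySem.Dict String Int)
    (iv : Int × String) : List String × PySem.Dict String Int :=
  let lst := st.1
  let seen := st.2
  let i := iv.1
  let val := iv.2
  if counts.getD val 0 > 1 then
    let k := seen.getD val 0 + 1
    (PySem.List.pySetD lst i (PySem.List.pyGetD lst i "" ++ " " ++ PySem.Int.toStr k),
     seen.insert val k)
  else (lst, seen)

def uniqueify_list_alt (mylist : List String) : List String :=
  let counts : PySem.Dict String Int :=
    mylist.foldl (fun d v => d.insert v (d.getD v 0 + 1)) PySem.Dict.empty
  ((PySem.List.enumerate mylist 0).foldl (stepB counts) (mylist, PySem.Dict.empty)).1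

-- ===== PRECONDITION & SPEC =====
def Spec_uniqueify_list (mylist : List String) (out : List String) : Prop := out = uniqueify_list_alt mylist
instance (mylist : List String) (out : List String) : Decidable (Spec_uniqueify_list mylist out) := by unfold Spec_uniqueify_list; infer_instance

-- ===== CLAIM (what is proved, stated in full; the proofs are below) =====
def Claim_equal_uniqueify_list : Prop := ∀ (mylist : List String), Dom_uniqueify_list mylist → Spec_uniqueify_list mylist (uniqueify_list mylist)

-- ===== LEMMAS AND PROOFS =====

-- the common value of both programs: element j of q gets ' k' appended iff its value occurs more
-- than once in q, where k is its occurrence number (count of the value among q[0..j]).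
def pp (q : List String) : List String :=
  q.zipIdx.map fun vj =>
    vj.1 ++ (if 1 < q.count vj.1 then " " ++ PySem.Int.toStr (((q.take (vj.2 + 1)).count vj.1 : Nat) : Int) else "")
theorem length_pp (q : List String) : (pp q).length = q.length := by simp [pp]
theorem getElem_pp (q : List String) (j : Nat) (hj : j < q.length) :
    (pp q)[j]'(by simp [length_pp, hj]) =
      q[j] ++ (if 1 < q.count q[j] then " " ++ PySem.Int.toStr (((q.take (j + 1)).count q[j] : Nat) : Int) else "") := by
  simp [pp]
theorem count_take_pos (p : List String) (v : String) (j : Nat) (hj : j < p.length)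
    (hv : p[j] = v) : 0 < (p.take (j + 1)).count v := by
  have hlt : j < (p.take (j + 1)).length := by simp; omega
  have := List.getElem_mem hlt
  rw [List.getElem_take] at this
  exact List.count_pos_iff.mpr (hv ▸ this)
theorem count_take_le (p : List String) (v : String) (j : Nat) :
    (p.take (j + 1)).count v ≤ p.count v :=
  (List.take_sublist _ _).count_le v
theorem eq_idxOf_of_count_one (p : List String) (v : String) (j : Nat) (hj : j < p.length)
    (hv : p[j] = v) (hc : p.count v = 1) : j = p.idxOf v := by
  by_contra hne
  have hmem : v ∈ p := hv ▸ List.getElem_mem hj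
  have hi : p.idxOf v < p.length := List.idxOf_lt_length_of_mem hmem
  have hgi : p[p.idxOf v] = v := List.getElem_idxOf hi
  have hdup : p.Duplicate v := by
    rcases Nat.lt_or_ge j (p.idxOf v) with h | h
    · exact List.duplicate_iff_exists_distinct_get.mpr ⟨⟨j, hj⟩, ⟨p.idxOf v, hi⟩, by simpa using h, by simp [hv], by simp [hgi]⟩
    · have h' : p.idxOf v < j := lt_of_le_of_ne h (fun e => hne e.symm)
      exact List.duplicate_iff_exists_distinct_get.mpr ⟨⟨p.idxOf v, hi⟩, ⟨j, hj⟩, by simpa using h', by simp [hgi], by simp [hv]⟩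
  have := List.duplicate_iff_two_le_count.mp hdup
  omega

theorem pp_append (p : List String) (v : String) :
    pp (p ++ [v]) =
      (if p.count v = 1 then (pp p).set (p.idxOf v) (v ++ " " ++ PySem.Int.toStr 1) else pp p)
        ++ [v ++ (if 0 < p.count v then " " ++ PySem.Int.toStr ((p.count v : Nat) + 1 : Int) else "")] := by
  apply List.ext_getElem
  · simp [length_pp]; split_ifs <;> simp [length_pp]
  · intro j h1 h2
    have hlen : j < p.length + 1 := by simpa [length_pp] using h1
    rcases Nat.lt_or_ge j p.length with hj | hj
    · -- j inside p
      have hjv : (p ++ [v])[j]'(by simp; omega) = p[j] := List.getElem_append_left (by omega)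
      have htake : (p ++ [v]).take (j + 1) = p.take (j + 1) := List.take_append_of_le_length (by omega)
      have hcnt : ∀ x, (p ++ [v]).count x = p.count x + if v = x then 1 else 0 := by
        intro x; simp [List.count_append, List.count_singleton]
      rw [getElem_pp (p ++ [v]) j (by simp; omega)]
      rw [hjv, htake, hcnt]
      rw [List.getElem_append_left (by split_ifs <;> simp [length_pp, hj])]
      by_cases hpv : p[j] = v
      · have hmem : v ∈ p := hpv ▸ List.getElem_mem hj
        have hc1 : 1 ≤ p.count v := List.count_pos_iff.mpr hmem
        rw [hpv]
        simp only [if_true]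
        by_cases hc : p.count v = 1
        · have hje : j = p.idxOf v := eq_idxOf_of_count_one p v j hj hpv hc
          have htc : (p.take (j + 1)).count v = 1 := by
            have := count_take_pos p v j hj hpv
            have := count_take_le p v j
            omega
          simp only [if_pos hc, htc]
          rw [if_pos (by omega)]
          simp [hje, String.append_assoc]
        · simp only [if_neg hc]
          rw [getElem_pp p j hj, hpv]
          rw [if_pos (by omega), if_pos (by omega)]
      · have hne : v ≠ p[j] := fun e => hpv e.symm
        rw [if_neg hne]
        have hrhs : (if p.count v = 1 then (pp p).set (p.idxOf v) (v ++ " " ++ PySem.Int.toStr 1) else pp p)[j]'(by split_ifs <;> simp [length_pp, hj]) = (pp p)[j]'(by simp [length_pp, hj]) := by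
          split_ifs with hc
          · have hi : p.idxOf v ≠ j := by
              intro he
              have hmem : v ∈ p := List.count_pos_iff.mp (by omega)
              have hgi := List.getElem_idxOf (List.idxOf_lt_length_of_mem hmem)
              subst he
              exact hpv hgi
            simp [hi]
          · rfl
        rw [hrhs, getElem_pp p j hj]
        simp
    · -- j = p.length
      have hje : j = p.length := by omega
      subst hje
      rw [getElem_pp (p ++ [v]) p.length (by simp)]
      have hfst : (if p.count v = 1 then (pp p).set (p.idxOf v) (v ++ " " ++ PySem.Int.toStr 1) else pp p).length = p.length := by
        split_ifs <;> simp [length_pp]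
      have hv' : (p ++ [v])[p.length]'(by simp) = v := by simp
      rw [hv']
      have htake : (p ++ [v]).take (p.length + 1) = p ++ [v] := by
        apply List.take_of_length_le; simp
      have hcv : (p ++ [v]).count v = p.count v + 1 := by simp [List.count_append]
      rw [htake, hcv]
      rw [List.getElem_append_right (by omega)]
      simp only [hfst, Nat.sub_self, List.getElem_cons_zero]
      split_ifs with ha hb <;> first | rfl | omega

theorem B_go (orig : List String) (counts : PySem.Dict String Int)
    (hcounts : ∀ v, counts.getD v 0 = (orig.count v : Int)) :
    ∀ (l p : List String) (seen : PySem.Dict String Int),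
    orig = p ++ l →
    (∀ v, 1 < orig.count v → seen.getD v 0 = (p.count v : Int)) →
    ((PySem.List.enumerate l (p.length : Int)).foldl (stepB counts)
        ((pp orig).take p.length ++ l, seen)).1 = pp orig := by
  intro l
  induction l with
  | nil =>
    intro p seen horig hseen
    have htake0 : (pp orig).take p.length = pp orig :=
      List.take_of_length_le (by rw [length_pp, horig]; simp)
    simp [PySem.List.enumerate_nil, htake0]
  | cons val l' ih =>
    intro p seen horig hseen
    subst horig
    have hplen : p.length < (p ++ val :: l').length := by simp
    have hget : (p ++ val :: l')[p.length]'hplen = val := by simp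
    have htakeS : (p ++ val :: l').take (p.length + 1) = p ++ [val] := by
      have h1 : List.take (p.length + 1) p = p := List.take_of_length_le (by omega)
      rw [List.take_append, h1, show p.length + 1 - p.length = 1 by omega]
      rfl
    have hppn : (pp (p ++ val :: l'))[p.length]'(by rw [length_pp]; exact hplen) =
        val ++ (if 1 < (p ++ val :: l').count val then
          " " ++ PySem.Int.toStr ((p.count val + 1 : Nat) : Int) else "") := by
      rw [getElem_pp (p ++ val :: l') p.length hplen]
      rw [hget, htakeS]
      simp [List.count_append]
    have htk : (pp (p ++ val :: l')).take (p.length + 1) =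
        (pp (p ++ val :: l')).take p.length ++ [(pp (p ++ val :: l'))[p.length]'(by rw [length_pp]; exact hplen)] := by
      rw [List.take_add_one, List.getElem?_eq_getElem (by rw [length_pp]; exact hplen)]
      rfl
    have hlentake : ((pp (p ++ val :: l')).take p.length).length = p.length := by
      rw [List.length_take, length_pp]; simp
    rw [PySem.List.enumerate_cons, List.foldl_cons]
    have hread : PySem.List.pyGetD ((pp (p ++ val :: l')).take p.length ++ val :: l') (p.length : Int) "" = val := by
      rw [PySem.List.pyGetD_natCast]
      rw [List.getD_eq_getElem?_getD, List.getElem?_append_right (by omega)]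
      simp [hlentake]
    have hwrite : ∀ x, PySem.List.pySetD ((pp (p ++ val :: l')).take p.length ++ val :: l') (p.length : Int) x =
        (pp (p ++ val :: l')).take p.length ++ x :: l' := by
      intro x
      rw [PySem.List.pySetD_natCast, List.set_append, if_neg (by omega)]
      simp [hlentake]
    by_cases hdup : 1 < (p ++ val :: l').count val
    · have hstep : stepB counts ((pp (p ++ val :: l')).take p.length ++ val :: l', seen) ((p.length : Int), val) =
          ((pp (p ++ val :: l')).take (p.length + 1) ++ l', seen.insert val ((p.count val : Int) + 1)) := by
        simp only [stepB]
        rw [if_pos (by rw [hcounts]; exact_mod_cast hdup)]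
        rw [hseen val hdup, hread, hwrite]
        rw [htk, hppn, if_pos hdup]
        simp [String.append_assoc]
      rw [hstep]
      have := ih (p ++ [val]) (seen.insert val ((p.count val : Int) + 1))
        (by simp)
        (by
          intro w hw
          rw [PySem.Dict.getD_insert]
          split_ifs with he
          · subst he; simp [List.count_append]
          · rw [hseen w hw]
            have : List.count w [val] = 0 := by
              simp [List.count_singleton]
              intro he'; exact absurd he'.symm he
            simp [List.count_append, this])
      simpa [List.length_append] using this
    · have hstep : stepB counts ((pp (p ++ val :: l')).take p.length ++ val :: l', seen) ((p.length : Int), val) =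
          ((pp (p ++ val :: l')).take (p.length + 1) ++ l', seen) := by
        simp only [stepB]
        rw [if_neg (by rw [hcounts]; exact_mod_cast hdup)]
        rw [htk, hppn, if_neg hdup]
        simp
      rw [hstep]
      have := ih (p ++ [val]) seen
        (by simp)
        (by
          intro w hw
          have hne : w ≠ val := by
            intro he; subst he; exact hdup hw
          rw [hseen w hw]
          have : List.count w [val] = 0 := by
            simp [List.count_singleton]
            intro he'; exact absurd he'.symm hne
          simp [List.count_append, this])
      simpa [List.length_append] using this

theorem A_go : ∀ (r p : List String) (dups : PySem.Dict String (Int × Int)),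
    (∀ v, dups.get? v = if p.count v = 0 then none
      else some ((p.idxOf v : Int), (p.count v : Int))) →
    ((PySem.List.enumerate r (p.length : Int)).foldl stepA (pp p ++ r, dups)).1 = pp (p ++ r) := by
  intro r
  induction r with
  | nil => intro p dups hinv; simp [PySem.List.enumerate_nil]
  | cons val r' ih =>
    intro p dups hinv
    rw [PySem.List.enumerate_cons, List.foldl_cons]
    have hlenpp : (pp p).length = p.length := length_pp p
    have hwrite2 : ∀ (q : List String) x, q.length = p.length →
        PySem.List.pySetD (q ++ val :: r') (p.length : Int) x = q ++ x :: r' := by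
      intro q x hq
      rw [PySem.List.pySetD_natCast, List.set_append, if_neg (by omega)]
      simp [hq]
    have hread2 : ∀ (q : List String), q.length = p.length →
        PySem.List.pyGetD (q ++ val :: r') (p.length : Int) "" = val := by
      intro q hq
      rw [PySem.List.pyGetD_natCast, List.getD_eq_getElem?_getD,
        List.getElem?_append_right (by omega)]
      simp [hq]
    by_cases hc0 : p.count val = 0
    · -- first occurrence: val not yet in dups
      have hcont : dups.contains val = false := by
        rw [PySem.Dict.contains_eq_isSome_get?, hinv val, if_pos hc0]; rfl
      have hnotmem : val ∉ p := by
        intro hm; exact absurd (List.count_pos_iff.mpr hm) (by omega)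
      have hpp : pp (p ++ [val]) = pp p ++ [val] := by
        rw [pp_append, if_neg (by omega), if_neg (by omega)]
        simp
      have hstep : stepA (pp p ++ val :: r', dups) ((p.length : Int), val) =
          (pp p ++ val :: r', dups.insert val ((p.length : Int), 1)) := by
        simp only [stepA]
        rw [hcont]
        simp
      rw [hstep]
      have hinv' : ∀ w, (dups.insert val ((p.length : Int), 1)).get? w =
          if (p ++ [val]).count w = 0 then none
          else some (((p ++ [val]).idxOf w : Int), ((p ++ [val]).count w : Int)) := by
        intro w
        rw [PySem.Dict.get?_insert]
        by_cases he : w = val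
        · subst he
          rw [if_pos rfl, if_neg (by simp [List.count_append])]
          rw [List.idxOf_append, if_neg hnotmem]
          simp [List.count_append, hc0]
        · rw [if_neg he, hinv w]
          have hcw : (p ++ [val]).count w = p.count w := by
            have : List.count w [val] = 0 := by
              simp [List.count_singleton]
              intro he'; exact absurd he'.symm he
            simp [List.count_append, this]
          rw [hcw]
          by_cases hz : p.count w = 0
          · rw [if_pos hz, if_pos hz]
          · rw [if_neg hz, if_neg hz, List.idxOf_append,
              if_pos (List.count_pos_iff.mp (by omega))]
      have := ih (p ++ [val]) (dups.insert val ((p.length : Int), 1)) hinv'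
      rw [hpp] at this
      simpa [List.length_append] using this
    · -- duplicate: val already recorded in dups
      have hmem : val ∈ p := List.count_pos_iff.mp (by omega)
      have hcont : dups.contains val = true := by
        rw [PySem.Dict.contains_eq_isSome_get?, hinv val, if_neg hc0]; rfl
      have hgetD : dups.getD val (0, 0) = ((p.idxOf val : Int), (p.count val : Int)) := by
        rw [PySem.Dict.getD_eq_get?_getD, hinv val, if_neg hc0]; rfl
      have hfi : p.idxOf val < p.length := List.idxOf_lt_length_of_mem hmem
      have hreadfi : PySem.List.pyGetD (pp p ++ val :: r') ((p.idxOf val : Nat) : Int) "" =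
          (pp p)[p.idxOf val]'(by omega) := by
        rw [PySem.List.pyGetD_natCast, List.getD_eq_getElem?_getD,
          List.getElem?_append_left (by omega), List.getElem?_eq_getElem (by omega)]
        rfl
      have hwritefi : ∀ x, PySem.List.pySetD (pp p ++ val :: r') ((p.idxOf val : Nat) : Int) x =
          (pp p).set (p.idxOf val) x ++ val :: r' := by
        intro x
        rw [PySem.List.pySetD_natCast, List.set_append, if_pos (by omega)]
      have hinv' : ∀ w, (dups.insert val (((p.idxOf val : Nat) : Int), (p.count val : Int) + 1)).get? w =
          if (p ++ [val]).count w = 0 then none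
          else some (((p ++ [val]).idxOf w : Int), ((p ++ [val]).count w : Int)) := by
        intro w
        rw [PySem.Dict.get?_insert]
        by_cases he : w = val
        · subst he
          rw [if_pos rfl, if_neg (by simp [List.count_append])]
          rw [List.idxOf_append, if_pos hmem]
          simp [List.count_append]
        · rw [if_neg he, hinv w]
          have hcw : (p ++ [val]).count w = p.count w := by
            have : List.count w [val] = 0 := by
              simp [List.count_singleton]
              intro he'; exact absurd he'.symm he
            simp [List.count_append, this]
          rw [hcw]
          by_cases hz : p.count w = 0
          · rw [if_pos hz, if_pos hz]
          · rw [if_neg hz, if_neg hz, List.idxOf_append,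
              if_pos (List.count_pos_iff.mp (by omega))]
      by_cases hc1 : p.count val = 1
      · -- back-patch the first occurrence
        have hvalfi : (pp p)[p.idxOf val]'(by omega) = val := by
          rw [getElem_pp p (p.idxOf val) hfi, List.getElem_idxOf hfi]
          rw [if_neg (by omega)]
          simp
        have hstep : stepA (pp p ++ val :: r', dups) ((p.length : Int), val) =
            ((pp p).set (p.idxOf val) (val ++ " " ++ PySem.Int.toStr 1) ++
                (val ++ " " ++ PySem.Int.toStr ((p.count val : Int) + 1)) :: r',
             dups.insert val (((p.idxOf val : Nat) : Int), (p.count val : Int) + 1)) := by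
          simp only [stepA]
          rw [hcont]
          simp only [Bool.true_eq_false, if_false, hgetD]
          rw [if_pos (by exact_mod_cast hc1)]
          rw [hreadfi, hvalfi, hwritefi]
          rw [hread2 _ (by simp [hlenpp]), hwrite2 _ _ (by simp [hlenpp])]
          rw [hc1]
          norm_num
        rw [hstep]
        have hpp : pp (p ++ [val]) =
            (pp p).set (p.idxOf val) (val ++ " " ++ PySem.Int.toStr 1) ++
              [val ++ " " ++ PySem.Int.toStr ((p.count val : Int) + 1)] := by
          rw [pp_append, if_pos hc1]
          rw [if_pos (by omega)]
          simp [String.append_assoc]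
        have := ih (p ++ [val]) _ hinv'
        rw [hpp] at this
        simpa [List.length_append] using this
      · -- later occurrence: only the current element is patched
        have hstep : stepA (pp p ++ val :: r', dups) ((p.length : Int), val) =
            (pp p ++ (val ++ " " ++ PySem.Int.toStr ((p.count val : Int) + 1)) :: r',
             dups.insert val (((p.idxOf val : Nat) : Int), (p.count val : Int) + 1)) := by
          simp only [stepA]
          rw [hcont]
          simp only [Bool.true_eq_false, if_false, hgetD]
          rw [if_neg (by exact_mod_cast hc1)]
          rw [hread2 _ hlenpp, hwrite2 _ _ hlenpp]
        rw [hstep]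
        have hpp : pp (p ++ [val]) =
            pp p ++ [val ++ " " ++ PySem.Int.toStr ((p.count val : Int) + 1)] := by
          rw [pp_append, if_neg hc1]
          rw [if_pos (by omega)]
          simp [String.append_assoc]
        have := ih (p ++ [val]) _ hinv'
        rw [hpp] at this
        simpa [List.length_append] using this

theorem A_eq_pp (mylist : List String) : uniqueify_list mylist = pp mylist := by
  have h := A_go mylist [] PySem.Dict.empty (by intro v; simp)
  simpa [uniqueify_list, pp] using h

theorem B_eq_pp (mylist : List String) : uniqueify_list_alt mylist = pp mylist := by
  have hcounts : ∀ v, (mylist.foldl (fun d v => d.insert v (d.getD v 0 + 1))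
      (PySem.Dict.empty : PySem.Dict String Int)).getD v 0 = (mylist.count v : Int) := by
    intro v
    simp [PySem.Dict.getD_foldl_insert_add_one]
  have h := B_go mylist _ hcounts mylist [] PySem.Dict.empty rfl (by intro v _; simp)
  simpa [uniqueify_list_alt, pp] using h

-- ===== VERDICT (by name: the statement is the Claim_ definition above) =====
theorem uniqueify_list_spec : Claim_equal_uniqueify_list := by
  intro mylist _
  unfold Spec_uniqueify_list
  rw [A_eq_pp, B_eq_pp]
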